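-- pv_equiv track=rewrite | github.com/kadumel/SisEvol | cardapio/management/commands/set_cores_categorias.py | _color_for_categoria
-- ===== SOURCE A (Python) =====
-- def _color_for_categoria(nome: str, default: str = "#667eea") -> str:
-- 	n = (nome or "").lower()
-- 	if any(k in n for k in ["entrada", "bruschetta", "pao", "camar", "polvo"]):
-- 		return "#ff9800"  # laranja
-- 	if any(k in n for k in ["sobremesa", "sobremesas", "doce", "torta", "sorvete", "pudim", "chocolate"]):
-- 		return "#e91e63"  # rosa
-- 	if any(k in n for k in ["salada", "saladas", "folha", "veg", "burrata"]):
-- 		return "#4caf50"  # verde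
-- 	if any(k in n for k in ["bovino", "carne", "cortes", "steak", "picanha", "maminha", "ancho", "rib", "denver", "parrilla", "parrila"]):
-- 		return "#9c27b0"  # roxo
-- 	if any(k in n for k in ["peixe", "salm", "frutos do mar"]):
-- 		return "#03a9f4"  # azul claro
-- 	if any(k in n for k in ["ave", "frango", "galetinho"]):
-- 		return "#8bc34a"  # verde claro
-- 	if any(k in n for k in ["suin", "porco", "barriga", "prime rib su"]):
-- 		return "#795548"  # marrom
-- 	if any(k in n for k in ["lingui", "embutido"]):
-- 		return "#ff5722"  # laranja escuro
-- 	if any(k in n for k in ["acompanh", "guarni", "side"]):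
-- 		return "#607d8b"  # cinza-azulado
-- 	if any(k in n for k in ["kids", "infantil"]):
-- 		return "#009688"  # teal
-- 	if any(k in n for k in ["lanche", "burger", "sand"]):
-- 		return "#ffc107"  # âmbar
-- 	if any(k in n for k in ["executivo", "prato do dia"]):
-- 		return "#3f51b5"  # índigo
-- 	if any(k in n for k in ["wagyu"]):
-- 		return "#ff5722"
-- 	if any(k in n for k in ["compartilhar", "tabua", "familia"]):
-- 		return "#9e9e9e"  # cinza
-- 	return default
-- ===== SOURCE B (Python) =====
-- # Flat keyword -> (priority, color) map; exhaustive scan keeping the best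
-- # (lowest-priority) match instead of a cascade of early returns.
-- _KEYWORD_COLOR = {
--     "entrada": (0, "#ff9800"), "bruschetta": (0, "#ff9800"), "pao": (0, "#ff9800"),
--     "camar": (0, "#ff9800"), "polvo": (0, "#ff9800"),
--     "sobremesa": (1, "#e91e63"), "sobremesas": (1, "#e91e63"), "doce": (1, "#e91e63"),
--     "torta": (1, "#e91e63"), "sorvete": (1, "#e91e63"), "pudim": (1, "#e91e63"),
--     "chocolate": (1, "#e91e63"),
--     "salada": (2, "#4caf50"), "saladas": (2, "#4caf50"), "folha": (2, "#4caf50"),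
--     "veg": (2, "#4caf50"), "burrata": (2, "#4caf50"),
--     "bovino": (3, "#9c27b0"), "carne": (3, "#9c27b0"), "cortes": (3, "#9c27b0"),
--     "steak": (3, "#9c27b0"), "picanha": (3, "#9c27b0"), "maminha": (3, "#9c27b0"),
--     "ancho": (3, "#9c27b0"), "rib": (3, "#9c27b0"), "denver": (3, "#9c27b0"),
--     "parrilla": (3, "#9c27b0"), "parrila": (3, "#9c27b0"),
--     "peixe": (4, "#03a9f4"), "salm": (4, "#03a9f4"), "frutos do mar": (4, "#03a9f4"),
--     "ave": (5, "#8bc34a"), "frango": (5, "#8bc34a"), "galetinho": (5, "#8bc34a"),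
--     "suin": (6, "#795548"), "porco": (6, "#795548"), "barriga": (6, "#795548"),
--     "prime rib su": (6, "#795548"),
--     "lingui": (7, "#ff5722"), "embutido": (7, "#ff5722"),
--     "acompanh": (8, "#607d8b"), "guarni": (8, "#607d8b"), "side": (8, "#607d8b"),
--     "kids": (9, "#009688"), "infantil": (9, "#009688"),
--     "lanche": (10, "#ffc107"), "burger": (10, "#ffc107"), "sand": (10, "#ffc107"),
--     "executivo": (11, "#3f51b5"), "prato do dia": (11, "#3f51b5"),
--     "wagyu": (12, "#ff5722"),
--     "compartilhar": (13, "#9e9e9e"), "tabua": (13, "#9e9e9e"), "familia": (13, "#9e9e9e"),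
-- }
--
--
-- def _color_for_categoria(nome: str, default: str = "#667eea") -> str:
-- 	n = (nome or "").lower()
-- 	best = None
-- 	for k, (prio, color) in _KEYWORD_COLOR.items():
-- 		if k in n and (best is None or prio < best[0]):
-- 			best = (prio, color)
-- 	return best[1] if best is not None else default
-- ===== Notes on version B (the rewrite author's own statement) =====
-- stated objective: alternative
-- what changed: Replaces the cascade of 14 early-return if-branches over keyword groups with a flat keyword->(priority,color) map scanned exhaustively once, keeping the minimum-priority match in an accumulator and returning its color (equivalent because group priorities are strictly increasing, so the minimum-priority match is exactly the first group that matches).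
import Mathlib
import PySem

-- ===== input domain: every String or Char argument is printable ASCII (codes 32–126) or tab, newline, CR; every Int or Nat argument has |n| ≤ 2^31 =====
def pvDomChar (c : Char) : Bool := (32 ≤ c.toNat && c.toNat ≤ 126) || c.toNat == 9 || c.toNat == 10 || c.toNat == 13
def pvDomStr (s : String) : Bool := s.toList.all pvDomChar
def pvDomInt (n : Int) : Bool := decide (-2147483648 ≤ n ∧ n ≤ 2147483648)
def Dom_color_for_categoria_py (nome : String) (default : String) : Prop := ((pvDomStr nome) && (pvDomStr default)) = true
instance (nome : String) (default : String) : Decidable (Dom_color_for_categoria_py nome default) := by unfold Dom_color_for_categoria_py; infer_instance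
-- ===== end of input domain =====

-- B replaces A's cascade of 14 early-return branches by a flat keyword -> (priority, color)
-- map scanned exhaustively with a minimum-priority accumulator (objective: alternative).

-- ===== PORT A =====
def color_for_categoria_py (nome : String) (default : String) : String :=
  -- n = (nome or "").lower()  ('nome or ""' is nome unless nome is falsy, i.e. empty)
  let n := PySem.Str.lower (if nome = "" then "" else nome)
  if (["entrada", "bruschetta", "pao", "camar", "polvo"].any fun k => PySem.Str.isIn k n) then "#ff9800"
  else if (["sobremesa", "sobremesas", "doce", "torta", "sorvete", "pudim", "chocolate"].any fun k => PySem.Str.isIn k n) then "#e91e63"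
  else if (["salada", "saladas", "folha", "veg", "burrata"].any fun k => PySem.Str.isIn k n) then "#4caf50"
  else if (["bovino", "carne", "cortes", "steak", "picanha", "maminha", "ancho", "rib", "denver", "parrilla", "parrila"].any fun k => PySem.Str.isIn k n) then "#9c27b0"
  else if (["peixe", "salm", "frutos do mar"].any fun k => PySem.Str.isIn k n) then "#03a9f4"
  else if (["ave", "frango", "galetinho"].any fun k => PySem.Str.isIn k n) then "#8bc34a"
  else if (["suin", "porco", "barriga", "prime rib su"].any fun k => PySem.Str.isIn k n) then "#795548"
  else if (["lingui", "embutido"].any fun k => PySem.Str.isIn k n) then "#ff5722"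
  else if (["acompanh", "guarni", "side"].any fun k => PySem.Str.isIn k n) then "#607d8b"
  else if (["kids", "infantil"].any fun k => PySem.Str.isIn k n) then "#009688"
  else if (["lanche", "burger", "sand"].any fun k => PySem.Str.isIn k n) then "#ffc107"
  else if (["executivo", "prato do dia"].any fun k => PySem.Str.isIn k n) then "#3f51b5"
  else if (["wagyu"].any fun k => PySem.Str.isIn k n) then "#ff5722"
  else if (["compartilhar", "tabua", "familia"].any fun k => PySem.Str.isIn k n) then "#9e9e9e"
  else default

-- ===== PORT B =====
-- _KEYWORD_COLOR of Source B: a flat dict keyword -> (priority, color), in insertion order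
def pvKeywordColor : List (String × Nat × String) :=
  [("entrada", 0, "#ff9800"), ("bruschetta", 0, "#ff9800"), ("pao", 0, "#ff9800"),
   ("camar", 0, "#ff9800"), ("polvo", 0, "#ff9800"),
   ("sobremesa", 1, "#e91e63"), ("sobremesas", 1, "#e91e63"), ("doce", 1, "#e91e63"),
   ("torta", 1, "#e91e63"), ("sorvete", 1, "#e91e63"), ("pudim", 1, "#e91e63"),
   ("chocolate", 1, "#e91e63"),
   ("salada", 2, "#4caf50"), ("saladas", 2, "#4caf50"), ("folha", 2, "#4caf50"),
   ("veg", 2, "#4caf50"), ("burrata", 2, "#4caf50"),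
   ("bovino", 3, "#9c27b0"), ("carne", 3, "#9c27b0"), ("cortes", 3, "#9c27b0"),
   ("steak", 3, "#9c27b0"), ("picanha", 3, "#9c27b0"), ("maminha", 3, "#9c27b0"),
   ("ancho", 3, "#9c27b0"), ("rib", 3, "#9c27b0"), ("denver", 3, "#9c27b0"),
   ("parrilla", 3, "#9c27b0"), ("parrila", 3, "#9c27b0"),
   ("peixe", 4, "#03a9f4"), ("salm", 4, "#03a9f4"), ("frutos do mar", 4, "#03a9f4"),
   ("ave", 5, "#8bc34a"), ("frango", 5, "#8bc34a"), ("galetinho", 5, "#8bc34a"),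
   ("suin", 6, "#795548"), ("porco", 6, "#795548"), ("barriga", 6, "#795548"),
   ("prime rib su", 6, "#795548"),
   ("lingui", 7, "#ff5722"), ("embutido", 7, "#ff5722"),
   ("acompanh", 8, "#607d8b"), ("guarni", 8, "#607d8b"), ("side", 8, "#607d8b"),
   ("kids", 9, "#009688"), ("infantil", 9, "#009688"),
   ("lanche", 10, "#ffc107"), ("burger", 10, "#ffc107"), ("sand", 10, "#ffc107"),
   ("executivo", 11, "#3f51b5"), ("prato do dia", 11, "#3f51b5"),
   ("wagyu", 12, "#ff5722"),
   ("compartilhar", 13, "#9e9e9e"), ("tabua", 13, "#9e9e9e"), ("familia", 13, "#9e9e9e")]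

-- loop body of Source B: 'if k in n and (best is None or prio < best[0]): best = (prio, color)'
def pvStep (n : String) (best : Option (Nat × String)) (e : String × Nat × String) : Option (Nat × String) :=
  if PySem.Str.isIn e.1 n && (match best with | none => true | some b => decide (e.2.1 < b.1)) then
    some e.2
  else best

def color_for_categoria_py_alt (nome : String) (default : String) : String :=
  let n := PySem.Str.lower (if nome = "" then "" else nome)
  -- 'best = None; for k, (prio, color) in _KEYWORD_COLOR.items(): ...'
  match pvKeywordColor.foldl (pvStep n) none with
  | some b => b.2        -- return best[1]
  | none => default

-- ===== PRECONDITION & SPEC =====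
def Spec_color_for_categoria_py (nome : String) (default : String) (out : String) : Prop := out = color_for_categoria_py_alt nome default
instance (nome : String) (default : String) (out : String) : Decidable (Spec_color_for_categoria_py nome default out) := by unfold Spec_color_for_categoria_py; infer_instance

-- ===== CLAIM (what is proved, stated in full; the proofs are below) =====
def Claim_equal_color_for_categoria_py : Prop := ∀ (nome : String) (default : String), Dom_color_for_categoria_py nome default → Spec_color_for_categoria_py nome default (color_for_categoria_py nome default)

-- ===== LEMMAS AND PROOFS =====

-- proof-only view of A's cascade: the grouped (color, keywords) table and first-match
def pvTable : List (String × List String) :=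
  [("#ff9800", ["entrada", "bruschetta", "pao", "camar", "polvo"]),
   ("#e91e63", ["sobremesa", "sobremesas", "doce", "torta", "sorvete", "pudim", "chocolate"]),
   ("#4caf50", ["salada", "saladas", "folha", "veg", "burrata"]),
   ("#9c27b0", ["bovino", "carne", "cortes", "steak", "picanha", "maminha", "ancho", "rib", "denver", "parrilla", "parrila"]),
   ("#03a9f4", ["peixe", "salm", "frutos do mar"]),
   ("#8bc34a", ["ave", "frango", "galetinho"]),
   ("#795548", ["suin", "porco", "barriga", "prime rib su"]),
   ("#ff5722", ["lingui", "embutido"]),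
   ("#607d8b", ["acompanh", "guarni", "side"]),
   ("#009688", ["kids", "infantil"]),
   ("#ffc107", ["lanche", "burger", "sand"]),
   ("#3f51b5", ["executivo", "prato do dia"]),
   ("#ff5722", ["wagyu"]),
   ("#9e9e9e", ["compartilhar", "tabua", "familia"])]

def pvFirst (n : String) (default : String) : List (String × List String) → String
  | [] => default
  | (color, ks) :: rest =>
      if ks.any (fun k => PySem.Str.isIn k n) then color else pvFirst n default rest

def pvFlatten (i : Nat) : List (String × List String) → List (String × Nat × String)
  | [] => []
  | (color, ks) :: rest => ks.map (fun k => (k, i, color)) ++ pvFlatten (i + 1) rest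

lemma pvFlatten_prio_ge : ∀ (t : List (String × List String)) (j : Nat),
    ∀ e ∈ pvFlatten j t, j ≤ e.2.1 := by
  intro t
  induction t with
  | nil => intro j e he; simp [pvFlatten] at he
  | cons hd tl ih =>
      intro j e he
      obtain ⟨c, ks⟩ := hd
      simp only [pvFlatten, List.mem_append, List.mem_map] at he
      rcases he with ⟨k, _, rfl⟩ | he
      · exact le_refl j
      · exact Nat.le_of_succ_le (ih (j + 1) e he)

lemma pvStep_stay (n : String) : ∀ (l : List (String × Nat × String)) (q : Nat) (c : String),
    (∀ e ∈ l, ¬ e.2.1 < q) → l.foldl (pvStep n) (some (q, c)) = some (q, c) := by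
  intro l
  induction l with
  | nil => intro q c _; rfl
  | cons e tl ih =>
      intro q c h
      have he : ¬ e.2.1 < q := h e (by simp)
      have hstep : pvStep n (some (q, c)) e = some (q, c) := by
        simp [pvStep, he]
      simp only [List.foldl_cons, hstep]
      exact ih q c (fun e' he' => h e' (by simp [he']))

lemma pvGroup_none (n : String) (i : Nat) (c : String) :
    ∀ (ks : List String), ks.any (fun k => PySem.Str.isIn k n) = false →
    ∀ acc, (ks.map (fun k => (k, i, c))).foldl (pvStep n) acc = acc := by
  intro ks
  induction ks with
  | nil => intro _ acc; rfl
  | cons k tl ih =>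
      intro h acc
      simp only [List.any_cons, Bool.or_eq_false_iff] at h
      have hstep : pvStep n acc (k, i, c) = acc := by
        unfold pvStep; rw [h.1]; rfl
      simp only [List.map_cons, List.foldl_cons, hstep]
      exact ih h.2 acc

lemma pvGroup_some (n : String) (i : Nat) (c : String) :
    ∀ (ks : List String), ks.any (fun k => PySem.Str.isIn k n) = true →
    (ks.map (fun k => (k, i, c))).foldl (pvStep n) none = some (i, c) := by
  intro ks
  induction ks with
  | nil => intro h; simp at h
  | cons k tl ih =>
      intro h
      by_cases hk : PySem.Str.isIn k n = true
      · have hstep : pvStep n none (k, i, c) = some (i, c) := by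
          unfold pvStep; rw [hk]; rfl
        simp only [List.map_cons, List.foldl_cons, hstep]
        exact pvStep_stay n _ i c (by
          intro e he
          simp only [List.mem_map] at he
          obtain ⟨k', _, rfl⟩ := he
          exact lt_irrefl i)
      · have hk' : PySem.Str.isIn k n = false := eq_false_of_ne_true hk
        have hstep : pvStep n none (k, i, c) = none := by
          unfold pvStep; rw [hk']; rfl
        simp only [List.map_cons, List.foldl_cons, hstep]
        refine ih ?_
        rw [List.any_cons, hk', Bool.false_or] at h
        exact h

lemma pvMain (n default : String) : ∀ (t : List (String × List String)) (i : Nat),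
    (match (pvFlatten i t).foldl (pvStep n) none with
     | some b => b.2
     | none => default) = pvFirst n default t := by
  intro t
  induction t with
  | nil => intro i; rfl
  | cons hd tl ih =>
      intro i
      obtain ⟨c, ks⟩ := hd
      simp only [pvFlatten, pvFirst, List.foldl_append]
      by_cases h : ks.any (fun k => PySem.Str.isIn k n) = true
      · rw [pvGroup_some n i c ks h]
        rw [pvStep_stay n _ i c (by
          intro e he
          have := pvFlatten_prio_ge tl (i + 1) e he
          omega)]
        rw [if_pos h]
      · have h' : ks.any (fun k => PySem.Str.isIn k n) = false := eq_false_of_ne_true h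
        rw [pvGroup_none n i c ks h']
        rw [if_neg (fun hc => by rw [h'] at hc; exact Bool.false_ne_true hc)]
        exact ih (i + 1)

lemma pvA_eq_first (n default : String) :
    (if (["entrada", "bruschetta", "pao", "camar", "polvo"].any fun k => PySem.Str.isIn k n) then "#ff9800"
     else if (["sobremesa", "sobremesas", "doce", "torta", "sorvete", "pudim", "chocolate"].any fun k => PySem.Str.isIn k n) then "#e91e63"
     else if (["salada", "saladas", "folha", "veg", "burrata"].any fun k => PySem.Str.isIn k n) then "#4caf50"
     else if (["bovino", "carne", "cortes", "steak", "picanha", "maminha", "ancho", "rib", "denver", "parrilla", "parrila"].any fun k => PySem.Str.isIn k n) then "#9c27b0"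
     else if (["peixe", "salm", "frutos do mar"].any fun k => PySem.Str.isIn k n) then "#03a9f4"
     else if (["ave", "frango", "galetinho"].any fun k => PySem.Str.isIn k n) then "#8bc34a"
     else if (["suin", "porco", "barriga", "prime rib su"].any fun k => PySem.Str.isIn k n) then "#795548"
     else if (["lingui", "embutido"].any fun k => PySem.Str.isIn k n) then "#ff5722"
     else if (["acompanh", "guarni", "side"].any fun k => PySem.Str.isIn k n) then "#607d8b"
     else if (["kids", "infantil"].any fun k => PySem.Str.isIn k n) then "#009688"
     else if (["lanche", "burger", "sand"].any fun k => PySem.Str.isIn k n) then "#ffc107"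
     else if (["executivo", "prato do dia"].any fun k => PySem.Str.isIn k n) then "#3f51b5"
     else if (["wagyu"].any fun k => PySem.Str.isIn k n) then "#ff5722"
     else if (["compartilhar", "tabua", "familia"].any fun k => PySem.Str.isIn k n) then "#9e9e9e"
     else default) = pvFirst n default pvTable := by
  simp only [pvTable, pvFirst]

lemma pvFlatten_table : pvFlatten 0 pvTable = pvKeywordColor := by
  decide

-- ===== VERDICT (by name: the statement is the Claim_ definition above) =====
theorem color_for_categoria_py_spec : Claim_equal_color_for_categoria_py := by
  intro nome default _
  unfold Spec_color_for_categoria_py color_for_categoria_py color_for_categoria_py_alt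
  rw [pvA_eq_first, ← pvFlatten_table, pvMain]
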